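-- pv_equiv track=rewrite | github.com/6868x88/project_root | project_c/news_service.py | limit_summary
-- ===== SOURCE A (Python) =====
-- def limit_summary(sentences, max_sentences=2, max_chars=250):
--     result = []
--     total_len = 0
--
--     for s in sentences:
--         if total_len + len(s) > max_chars:
--             break
--         result.append(s)
--         total_len += len(s)
--         if len(result) >= max_sentences:
--             break
--
--     return " ".join(result)
-- ===== SOURCE B (Python) =====
-- def limit_summary(sentences, max_sentences=2, max_chars=250):
--     seq = list(sentences)
--     cum = []
--     total = 0
--     for s in seq:
--         total += len(s)
--         cum.append(total)
--     char_cut = next((i for i, c in enumerate(cum) if c > max_chars), len(seq))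
--     k = max(0, min(char_cut, max_sentences))
--     return " ".join(seq[:k])
-- ===== Notes on version B (the rewrite author's own statement) =====
-- stated objective: alternative
-- what changed: Replaces A's single accumulating loop with early breaks by a two-phase decomposition: build cumulative character lengths, find the first index exceeding max_chars, then take min(char_cut, max_sentences) (clamped to 0) sentences by slicing and joining.
-- intended difference: When max_sentences <= 0 and the first sentence is nonempty and fits within max_chars, A still returns that first sentence (it appends before checking the count); B returns the empty string, which is what a limit of zero sentences intends. — e.g. on limit_summary(["hi"], 0, 250): A returns "hi", B returns ""
import Mathlib
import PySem

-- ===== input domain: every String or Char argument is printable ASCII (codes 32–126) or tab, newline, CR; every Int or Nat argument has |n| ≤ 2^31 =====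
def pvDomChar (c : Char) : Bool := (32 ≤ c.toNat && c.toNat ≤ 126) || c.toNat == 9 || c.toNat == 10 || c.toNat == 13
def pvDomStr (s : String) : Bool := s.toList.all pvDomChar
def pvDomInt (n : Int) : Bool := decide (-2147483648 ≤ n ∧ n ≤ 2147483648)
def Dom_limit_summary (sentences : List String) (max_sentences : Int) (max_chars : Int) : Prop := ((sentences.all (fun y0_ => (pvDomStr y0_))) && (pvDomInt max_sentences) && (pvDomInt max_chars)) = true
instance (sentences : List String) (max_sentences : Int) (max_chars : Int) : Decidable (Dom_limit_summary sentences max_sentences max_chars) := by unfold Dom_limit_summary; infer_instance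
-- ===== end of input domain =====

-- B replaces A's single accumulating loop (running total + early breaks) by a two-phase
-- decomposition: cumulative character lengths, first index exceeding max_chars, slice, join.
-- Objective: alternative decomposition, same cost.

-- ===== PORT A =====
-- the for-loop of A with its two breaks, state = (result, total_len)
def limitLoopA (rest : List String) (result : List String) (total_len : Int)
    (max_sentences : Int) (max_chars : Int) : List String :=
  match rest with
  | [] => result
  | s :: rest' =>
    if total_len + PySem.Str.len s > max_chars then result
    else
      let result' := result ++ [s]
      let total' := total_len + PySem.Str.len s
      if (result'.length : Int) ≥ max_sentences then result'
      else limitLoopA rest' result' total' max_sentences max_chars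

def limit_summary (sentences : List String) (max_sentences : Int) (max_chars : Int) : String :=
  PySem.Str.join " " (limitLoopA sentences [] 0 max_sentences max_chars)

-- ===== PORT B =====
-- phase 1 of Source B: cum = []; total = 0; for s in seq: total += len(s); cum.append(total)
def cumB (seq : List String) : List Int :=
  (seq.foldl (fun (p : List Int × Int) s =>
      (p.1 ++ [p.2 + PySem.Str.len s], p.2 + PySem.Str.len s)) ([], 0)).1

-- phase 2 of Source B: next((i for i, c in enumerate(cum) if c > max_chars), len(seq))
def findCutB (mc : Int) (cs : List Int) (i : Int) (dflt : Int) : Int :=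
  match cs with
  | [] => dflt
  | c :: r => if c > mc then i else findCutB mc r (i + 1) dflt

def limit_summary_alt (sentences : List String) (max_sentences : Int) (max_chars : Int) : String :=
  let cum := cumB sentences
  let char_cut := findCutB max_chars cum 0 (sentences.length : Int)
  let k := max 0 (min char_cut max_sentences)
  PySem.Str.join " " (PySem.List.slice sentences none (some k))

-- ===== PRECONDITION & SPEC =====
-- When max_sentences ≤ 0 and the first sentence is nonempty and fits within max_chars, A still
-- returns that first sentence (it appends before checking the count); B returns "", which is
-- what a limit of zero sentences intends.
def D_limit_summary (sentences : List String) (max_sentences : Int) (max_chars : Int) : Prop :=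
  max_sentences ≤ 0 ∧ sentences ≠ [] ∧ PySem.Str.len sentences.head! ≤ max_chars ∧ sentences.head! ≠ ""
instance (sentences : List String) (max_sentences : Int) (max_chars : Int) : Decidable (D_limit_summary sentences max_sentences max_chars) := by unfold D_limit_summary; infer_instance

def Spec_limit_summary (sentences : List String) (max_sentences : Int) (max_chars : Int) (out : String) : Prop := ¬ D_limit_summary sentences max_sentences max_chars → out = limit_summary_alt sentences max_sentences max_chars
instance (sentences : List String) (max_sentences : Int) (max_chars : Int) (out : String) : Decidable (Spec_limit_summary sentences max_sentences max_chars out) := by unfold Spec_limit_summary; infer_instance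

def pvDiffWitness_limit_summary : List String × Int × Int := (["hi"], 0, 250)
def pvDiffWitnessOut_limit_summary : String × String := ("hi", "")

-- ===== CLAIM (what is proved, stated in full; the proofs are below) =====
def Claim_unchanged_limit_summary : Prop := ∀ (sentences : List String) (max_sentences : Int) (max_chars : Int), Dom_limit_summary sentences max_sentences max_chars → Spec_limit_summary sentences max_sentences max_chars (limit_summary sentences max_sentences max_chars)
def Claim_changed_limit_summary : Prop := Dom_limit_summary (pvDiffWitness_limit_summary.1) (pvDiffWitness_limit_summary.2.1) (pvDiffWitness_limit_summary.2.2) ∧ D_limit_summary (pvDiffWitness_limit_summary.1) (pvDiffWitness_limit_summary.2.1) (pvDiffWitness_limit_summary.2.2) ∧ limit_summary (pvDiffWitness_limit_summary.1) (pvDiffWitness_limit_summary.2.1) (pvDiffWitness_limit_summary.2.2) = pvDiffWitnessOut_limit_summary.1 ∧ limit_summary_alt (pvDiffWitness_limit_summary.1) (pvDiffWitness_limit_summary.2.1) (pvDiffWitness_limit_summary.2.2) = pvDiffWitnessOut_limit_summary.2 ∧ pvDiffWitnessOut_limit_summary.1 ≠ pvDiffWitnessOut_limit_summary.2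
def Claim_exact_limit_summary : Prop := ∀ (sentences : List String) (max_sentences : Int) (max_chars : Int), Dom_limit_summary sentences max_sentences max_chars → D_limit_summary sentences max_sentences max_chars → limit_summary sentences max_sentences max_chars ≠ limit_summary_alt sentences max_sentences max_chars

-- ===== LEMMAS AND PROOFS =====

-- reference count: how many leading sentences A keeps
def kfun (seq : List String) (ms mc : Int) : Nat :=
  match seq with
  | [] => 0
  | s :: r =>
    if PySem.Str.len s > mc then 0
    else if ms ≤ 1 then 1
    else 1 + kfun r (ms - 1) (mc - PySem.Str.len s)

-- A's loop shifted to the empty accumulator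
theorem limitLoopA_shift (rest : List String) (result : List String) (total ms mc : Int) :
    limitLoopA rest result total ms mc
      = result ++ limitLoopA rest [] 0 (ms - result.length) (mc - total) := by
  induction rest generalizing result total ms mc with
  | nil => simp [limitLoopA]
  | cons s r ih =>
    simp only [limitLoopA]
    by_cases h1 : total + PySem.Str.len s > mc
    · rw [if_pos h1, if_pos (show 0 + PySem.Str.len s > mc - total by omega)]
      simp
    · rw [if_neg h1, if_neg (show ¬(0 + PySem.Str.len s > mc - total) by omega)]
      by_cases h2 : ((result ++ [s]).length : Int) ≥ ms
      · have h2' : (((([] : List String) ++ [s]).length : Int) ≥ ms - (result.length : Int)) := by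
          simp at h2 ⊢; omega
        rw [if_pos h2, if_pos h2']
        simp
      · have h2' : ¬ (((([] : List String) ++ [s]).length : Int) ≥ ms - (result.length : Int)) := by
          simp at h2 ⊢; omega
        rw [if_neg h2, if_neg h2']
        have e1 : ms - (((result ++ [s]).length : Nat) : Int)
            = (ms - (result.length : Int)) - (((([] : List String) ++ [s]).length : Nat) : Int) := by
          simp; ring
        have e2 : mc - (total + PySem.Str.len s) = (mc - total) - (0 + PySem.Str.len s) := by ring
        rw [ih (result ++ [s]), ih ([] ++ [s]), e1, e2, List.append_assoc]
        simp

theorem limitLoopA_eq_take (seq : List String) (ms mc : Int) :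
    limitLoopA seq [] 0 ms mc = seq.take (kfun seq ms mc) := by
  induction seq generalizing ms mc with
  | nil => simp [limitLoopA, kfun]
  | cons s r ih =>
    simp only [limitLoopA, kfun, zero_add]
    by_cases h1 : PySem.Str.len s > mc
    · rw [if_pos h1, if_pos h1]; simp
    · rw [if_neg h1, if_neg h1]
      by_cases h2 : ms ≤ 1
      · rw [if_pos (by simp; omega), if_pos h2]; simp
      · rw [if_neg (by simp; omega), if_neg h2]
        rw [limitLoopA_shift r ([] ++ [s]), ih]
        rw [Nat.add_comm, List.take_succ_cons]
        simp

-- exact cumulative sums starting at t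
def prefSums (seq : List String) (t : Int) : List Int :=
  match seq with
  | [] => []
  | s :: r => (t + PySem.Str.len s) :: prefSums r (t + PySem.Str.len s)

theorem cumB_eq_aux (seq : List String) (acc : List Int) (t : Int) :
    (seq.foldl (fun (p : List Int × Int) s =>
        (p.1 ++ [p.2 + PySem.Str.len s], p.2 + PySem.Str.len s)) (acc, t)).1
      = acc ++ prefSums seq t := by
  induction seq generalizing acc t with
  | nil => simp [prefSums]
  | cons s r ih =>
    simp only [List.foldl_cons, prefSums]
    rw [ih (acc ++ [t + PySem.Str.len s]) (t + PySem.Str.len s)]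
    simp

theorem cumB_eq (seq : List String) : cumB seq = prefSums seq 0 := by
  simpa [cumB] using cumB_eq_aux seq [] 0

-- the first index (counted from 0) whose cumulative sum exceeds c
def ccOpt (seq : List String) (c : Int) : Option Nat :=
  match seq with
  | [] => none
  | s :: r => if PySem.Str.len s > c then some 0 else (ccOpt r (c - PySem.Str.len s)).map (· + 1)

theorem findCutB_eq (seq : List String) (t i dflt mc : Int) :
    findCutB mc (prefSums seq t) i dflt
      = (ccOpt seq (mc - t)).elim dflt (fun j => i + (j : Int)) := by
  induction seq generalizing t i with
  | nil => simp [prefSums, findCutB, ccOpt, Option.elim]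
  | cons s r ih =>
    simp only [prefSums, findCutB, ccOpt]
    by_cases h1 : PySem.Str.len s > mc - t
    · rw [if_pos (show t + PySem.Str.len s > mc by omega), if_pos h1]
      simp [Option.elim]
    · rw [if_neg (show ¬(t + PySem.Str.len s > mc) by omega), if_neg h1]
      rw [ih (t + PySem.Str.len s) (i + 1)]
      rw [show mc - (t + PySem.Str.len s) = mc - t - PySem.Str.len s from by ring]
      cases hc : ccOpt r (mc - t - PySem.Str.len s) with
      | none => simp [Option.elim]
      | some j => simp [Option.elim]; omega

-- closed form of B's kept count
def ccVal (seq : List String) (mc : Int) : Int :=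
  (ccOpt seq mc).elim (seq.length : Int) (fun j => (j : Int))

theorem ccVal_nonneg (seq : List String) (mc : Int) : 0 ≤ ccVal seq mc := by
  unfold ccVal
  cases ccOpt seq mc with
  | none => simp [Option.elim]
  | some j => simp [Option.elim]

theorem alt_eq_take (seq : List String) (ms mc : Int) :
    limit_summary_alt seq ms mc
      = PySem.Str.join " " (seq.take (max 0 (min (ccVal seq mc) ms)).toNat) := by
  unfold limit_summary_alt
  show PySem.Str.join " " (PySem.List.slice seq none
      (some (max 0 (min (findCutB mc (cumB seq) 0 (seq.length : Int)) ms)))) = _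
  rw [cumB_eq]
  rw [findCutB_eq seq 0 0 (seq.length : Int) mc]
  rw [show mc - 0 = mc from by ring]
  have e : (ccOpt seq mc).elim (seq.length : Int) (fun j : Nat => (0 : Int) + (j : Int)) = ccVal seq mc := by
    unfold ccVal; cases ccOpt seq mc <;> simp [Option.elim]
  rw [e]
  rw [PySem.List.slice_to _ (le_max_left _ _)]

theorem kfun_closed (seq : List String) (ms mc : Int) :
    (kfun seq ms mc : Int) = min (ccVal seq mc) (max 1 ms) := by
  induction seq generalizing ms mc with
  | nil =>
    simp [kfun, ccOpt, ccVal, Option.elim]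
  | cons s r ih =>
    simp only [kfun, ccVal, ccOpt]
    by_cases h1 : PySem.Str.len s > mc
    · rw [if_pos h1, if_pos h1]
      simp [Option.elim]
    · rw [if_neg h1, if_neg h1]
      have hih := ih (ms - 1) (mc - PySem.Str.len s)
      unfold ccVal at hih
      cases hc : ccOpt r (mc - PySem.Str.len s) with
      | none =>
        rw [hc] at hih
        by_cases h2 : ms ≤ 1
        · rw [if_pos h2]
          simp [Option.elim]
          omega
        · rw [if_neg h2]
          simp [Option.elim] at hih ⊢
          omega
      | some j =>
        rw [hc] at hih
        by_cases h2 : ms ≤ 1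
        · rw [if_pos h2]
          simp [Option.elim]
          omega
        · rw [if_neg h2]
          simp [Option.elim] at hih ⊢
          omega

theorem join_singleton_str (s : String) : PySem.Str.join " " [s] = s := by
  simp [PySem.Str.join]

theorem join_nil_str : PySem.Str.join " " ([] : List String) = "" := by
  decide

-- ===== VERDICT (by name: the statement is the Claim_ definition above) =====
theorem limit_summary_spec : Claim_unchanged_limit_summary := by
  intro seq ms mc _ hD
  unfold limit_summary
  rw [limitLoopA_eq_take, alt_eq_take]
  by_cases hms : 1 ≤ ms
  · have h := kfun_closed seq ms mc
    have hcc := ccVal_nonneg seq mc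
    have : (max 0 (min (ccVal seq mc) ms)).toNat = kfun seq ms mc := by omega
    rw [this]
  · -- ms ≤ 0
    have hk : (max 0 (min (ccVal seq mc) ms)).toNat = 0 := by omega
    rw [hk]
    cases seq with
    | nil => simp [kfun]
    | cons s r =>
      simp only [kfun]
      by_cases h1 : PySem.Str.len s > mc
      · rw [if_pos h1]
      · rw [if_neg h1, if_pos (show ms ≤ 1 by omega)]
        have hs : s = "" := by
          by_contra hne
          exact hD ⟨by omega, by simp, by simpa using h1, by simpa using hne⟩
        subst hs
        simp [List.take, join_singleton_str, join_nil_str]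

theorem limit_summary_changed : Claim_changed_limit_summary := by
  unfold Claim_changed_limit_summary; decide

theorem limit_summary_tight : Claim_exact_limit_summary := by
  intro seq ms mc _ hD
  obtain ⟨hms, hne, hfit, hnemp⟩ := hD
  cases seq with
  | nil => exact absurd rfl hne
  | cons s r =>
    simp only [List.head!] at hfit hnemp
    unfold limit_summary
    rw [limitLoopA_eq_take, alt_eq_take]
    simp only [kfun]
    rw [if_neg (by omega), if_pos (by omega)]
    have hcc := ccVal_nonneg (s :: r) mc
    have hk : (max 0 (min (ccVal (s :: r) mc) ms)).toNat = 0 := by omega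
    rw [hk]
    simp [List.take, join_singleton_str]
    intro h
    exact hnemp h
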